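-- pv_equiv track=rewrite | github.com/duxfrederic/lightcurver | lightcurver/utilities/star_naming.py | generate_star_names
-- ===== SOURCE A (Python) =====
-- import string
-- import itertools
--
-- def generate_star_names(n):
--     """
--     just so we have a nicer way (than gaia ID in a given combined footprint / selection of stars) to refer to our stars
--     (assign each a letter / a combination of letters).
--     Args:
--         n: int, number of labels to generate
--
--     Returns:
--         list of strings, e.g. ['a', 'b', 'c', 'd', 'e', 'f', ...]
--     """
--     def all_strings():
--         size = 1
--         while True:
--             for s in itertools.product(string.ascii_lowercase, repeat=size):
--                 yield "".join(s)
--             size += 1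
--
--     return [name for _, name in zip(range(n), all_strings())]
-- ===== SOURCE B (Python) =====
-- def generate_star_names(n):
--     def _label(k):
--         s = ""
--         while k > 0:
--             k, rem = divmod(k - 1, 26)
--             s = chr(97 + rem) + s
--         return s
--     return [_label(i + 1) for i in range(n)]
-- ===== Notes on version B (the rewrite author's own statement) =====
-- stated objective: alternative
-- what changed: Replaces the itertools.product generator enumeration over growing lengths by a direct bijective base-26 conversion computing each label independently from its own one-based position.
import Mathlib
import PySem

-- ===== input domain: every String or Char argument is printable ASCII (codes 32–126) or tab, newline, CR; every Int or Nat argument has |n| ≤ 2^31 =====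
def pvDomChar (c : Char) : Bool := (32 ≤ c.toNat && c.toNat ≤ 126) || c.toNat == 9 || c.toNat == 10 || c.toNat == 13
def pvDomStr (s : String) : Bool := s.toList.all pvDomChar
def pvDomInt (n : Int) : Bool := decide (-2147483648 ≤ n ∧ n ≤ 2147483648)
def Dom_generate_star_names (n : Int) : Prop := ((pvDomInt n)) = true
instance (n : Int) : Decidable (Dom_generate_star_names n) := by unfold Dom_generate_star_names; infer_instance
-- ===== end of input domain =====

-- B generates each label by bijective base-26 arithmetic instead of A's product enumeration
-- over growing lengths (objective: alternative algorithm of the same linear cost).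

-- ===== PORT A =====
-- string.ascii_lowercase
def lettersA : List Char :=
  ['a','b','c','d','e','f','g','h','i','j','k','l','m','n','o','p','q','r','s','t','u','v','w','x','y','z']

-- itertools.product(string.ascii_lowercase, repeat=size), leftmost position varying slowest,
-- each tuple joined to a string (kept as List Char; String.mk applied at the end)
def prodA : Nat → List (List Char)
  | 0 => [[]]
  | s + 1 => lettersA.flatMap (fun c => (prodA s).map (fun w => c :: w))

theorem prodA_length (s : Nat) : (prodA s).length = 26 ^ s := by
  induction s with
  | zero => rfl
  | succ s ih =>
    show (lettersA.flatMap (fun c => (prodA s).map (fun w => c :: w))).length = _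
    rw [List.length_flatMap]
    simp only [List.length_map, ih, List.map_const']
    rw [List.sum_replicate]
    show (26 : Nat) • 26 ^ s = 26 ^ (s + 1)
    simp [pow_succ, Nat.mul_comm]

-- the zip(range(n), all_strings()) loop: consume the size-block streams in order, stopping after n names
def takeFromA (n : Nat) (size : Nat) : List (List Char) :=
  if h : n = 0 then []
  else
    let l := prodA size
    if n ≤ l.length then l.take n
    else l ++ takeFromA (n - l.length) (size + 1)
termination_by n
decreasing_by
  have : 0 < (prodA size).length := by
    rw [prodA_length]; positivity
  omega

def generate_star_names (n : Int) : List String :=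
  (takeFromA n.toNat 1).map String.mk

-- ===== PORT B =====
-- the while loop of _label: k, rem = divmod(k-1, 26); s = chr(97+rem) + s.
-- k is always ≥ 0 in B, so Nat division is exact here (Python floordiv = Nat div on nonnegatives).
def repB : Nat → List Char → List Char
  | 0, acc => acc
  | v + 1, acc => repB (v / 26) (Char.ofNat (97 + v % 26) :: acc)
termination_by v _ => v
decreasing_by exact Nat.lt_succ_of_le (Nat.div_le_self _ _)

-- [_label(i+1) for i in range(n)]; range(n) is 0..n-1 (empty for n ≤ 0), so i+1 ≥ 1 is a Nat
def generate_star_names_alt (n : Int) : List String :=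
  (List.range n.toNat).map (fun i => String.mk (repB (i + 1) []))

-- ===== PRECONDITION & SPEC =====
def Spec_generate_star_names (n : Int) (out : List String) : Prop := out = generate_star_names_alt n
instance (n : Int) (out : List String) : Decidable (Spec_generate_star_names n out) := by unfold Spec_generate_star_names; infer_instance

-- ===== CLAIM (what is proved, stated in full; the proofs are below) =====
def Claim_equal_generate_star_names : Prop := ∀ (n : Int), Dom_generate_star_names n → Spec_generate_star_names n (generate_star_names n)

-- ===== LEMMAS AND PROOFS =====

-- non-accumulator form of repB, peeling the least-significant letter from the back
def repR : Nat → List Char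
  | 0 => []
  | v + 1 => repR (v / 26) ++ [Char.ofNat (97 + v % 26)]
termination_by v => v
decreasing_by exact Nat.lt_succ_of_le (Nat.div_le_self _ _)

theorem repB_eq (v : Nat) : ∀ acc, repB v acc = repR v ++ acc := by
  induction v using Nat.strong_induction_on with
  | _ v ih =>
    intro acc
    match v with
    | 0 => simp [repB, repR]
    | w + 1 =>
      rw [repB, repR, ih (w / 26) (Nat.lt_succ_of_le (Nat.div_le_self _ _))]
      simp

-- number of labels of length ≤ t (26 + 26² + … + 26^t)
def base' : Nat → Nat
  | 0 => 0
  | t + 1 => 26 * base' t + 26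

theorem base'_pow (t : Nat) : base' (t + 1) = base' t + 26 ^ (t + 1) := by
  induction t with
  | zero => rfl
  | succ t ih =>
    have h1 : base' (t + 2) = 26 * base' (t + 1) + 26 := rfl
    have h2 : base' (t + 1) = 26 * base' t + 26 := rfl
    have hp : (26 : Nat) ^ (t + 2) = 26 * 26 ^ (t + 1) := by ring
    rw [h1, hp]
    omega

theorem lettersA_eq : lettersA = (List.range 26).map (fun r => Char.ofNat (97 + r)) := by
  decide

-- product with the last position varying fastest: append each letter at the end instead
theorem prodA_snoc (s : Nat) :
    prodA (s + 1) = (prodA s).flatMap (fun w => lettersA.map (fun c => w ++ [c])) := by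
  induction s with
  | zero => rfl
  | succ s ih =>
    calc prodA (s + 2)
        = lettersA.flatMap (fun c => (prodA (s + 1)).map (fun w => c :: w)) := rfl
      _ = lettersA.flatMap (fun c =>
            ((prodA s).flatMap (fun w => lettersA.map (fun c2 => w ++ [c2]))).map
              (fun w => c :: w)) := by rw [ih]
      _ = (prodA (s + 1)).flatMap (fun w => lettersA.map (fun c => w ++ [c])) := by
          show _ = (lettersA.flatMap (fun c => (prodA s).map (fun w => c :: w))).flatMap _
          simp [List.flatMap_assoc, List.flatMap_map, List.map_flatMap, List.map_map,
            Function.comp_def]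

theorem range_mul (a b : Nat) :
    List.range (a * b) = (List.range a).flatMap (fun j => (List.range b).map (fun r => j * b + r)) := by
  induction a with
  | zero => simp
  | succ a ih =>
    rw [Nat.succ_mul, List.range_add, ih, List.range_succ, List.flatMap_append]
    simp [Nat.add_comm]

theorem prodA_map (t : Nat) :
    prodA (t + 1) = (List.range (26 ^ (t + 1))).map (fun j => repR (base' t + j + 1)) := by
  induction t with
  | zero =>
    have h1 : prodA 1 = lettersA.map (fun c => [c]) := rfl
    rw [h1, lettersA_eq, List.map_map, pow_one]
    apply List.map_congr_left
    intro j hj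
    simp only [List.mem_range] at hj
    simp only [Function.comp, base']
    rw [show (0 : Nat) + j + 1 = j + 1 from by omega, repR,
        Nat.div_eq_of_lt (by omega), Nat.mod_eq_of_lt (by omega), repR]
    simp
  | succ t ih =>
    rw [prodA_snoc, ih, lettersA_eq]
    have h26 : (26 : Nat) ^ (t + 2) = 26 ^ (t + 1) * 26 := by ring
    rw [h26, range_mul, List.map_flatMap, List.flatMap_map]
    apply List.flatMap_congr
    intro j hj
    rw [List.map_map, List.map_map]
    apply List.map_congr_left
    intro r hr
    simp only [List.mem_range] at hr
    simp only [Function.comp]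
    have h2 : base' (t + 1) = 26 * base' t + 26 := rfl
    have hb : base' (t + 1) + (j * 26 + r) + 1 = 26 * (base' t + j + 1) + r + 1 := by omega
    have hdiv : (26 * (base' t + j + 1) + r) / 26 = base' t + j + 1 := by omega
    have hmod : (26 * (base' t + j + 1) + r) % 26 = r := by omega
    rw [hb]
    conv_rhs => rw [repR]
    rw [hdiv, hmod]

theorem takeFromA_map (n : Nat) : ∀ t, takeFromA n (t + 1) =
    (List.range n).map (fun i => repR (base' t + i + 1)) := by
  induction n using Nat.strong_induction_on with
  | _ n ih =>
    intro t
    rw [takeFromA]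
    split
    · simp [*]
    · next hn =>
      simp only [prodA_length]
      split
      · next hle =>
        rw [prodA_map, ← List.map_take, List.take_range, Nat.min_eq_left hle]
      · next hgt =>
        have hpos : 0 < (26 : Nat) ^ (t + 1) := by positivity
        rw [prodA_map, ih (n - 26 ^ (t + 1)) (by omega) (t + 1)]
        have hr : List.range n =
            List.range (26 ^ (t + 1)) ++
              (List.range (n - 26 ^ (t + 1))).map (fun x => 26 ^ (t + 1) + x) := by
          rw [← List.range_add]
          congr 1
          omega
        rw [hr, List.map_append, List.map_map]
        congr 1
        apply List.map_congr_left
        intro i _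
        simp only [Function.comp]
        rw [base'_pow]
        congr 1
        omega

-- ===== VERDICT (by name: the statement is the Claim_ definition above) =====
theorem generate_star_names_spec : Claim_equal_generate_star_names := by
  intro n _
  show generate_star_names n = generate_star_names_alt n
  unfold generate_star_names generate_star_names_alt
  rw [takeFromA_map n.toNat 0, List.map_map]
  apply List.map_congr_left
  intro i _
  simp [Function.comp, base', repB_eq]
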